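-- pv_equiv track=rewrite | github.com/dhakarshailendra829/Automated-Road-Condition-Detection | ui/app.py | recommendation_from_detections
-- ===== SOURCE A (Python) =====
-- def recommendation_from_detections(detections):
--     if not detections:
--         return {"level": "Low", "action": "No immediate action required"}
--     severities = [d.get("severity","MEDIUM") for d in detections]
--     if "HIGH" in severities:
--         return {"level": "High", "action": "Schedule immediate repair and dispatch crew"}
--     if "MEDIUM" in severities:
--         return {"level": "Medium", "action": "Plan maintenance and monitor"}
--     return {"level": "Low", "action": "Monitor periodically"}
-- ===== SOURCE B (Python) =====
-- def recommendation_from_detections(detections):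
--     if not detections:
--         return {"level": "Low", "action": "No immediate action required"}
--     rank_of = {"HIGH": 2, "MEDIUM": 1}
--     rank = max(rank_of.get(d.get("severity", "MEDIUM"), 0) for d in detections)
--     table = [
--         {"level": "Low", "action": "Monitor periodically"},
--         {"level": "Medium", "action": "Plan maintenance and monitor"},
--         {"level": "High", "action": "Schedule immediate repair and dispatch crew"},
--     ]
--     return table[rank]
-- ===== Notes on version B (the rewrite author's own statement) =====
-- stated objective: idiomatic
-- what changed: Replaced the two ordered membership scans over a severities list by a single max-fold computing a numeric rank (HIGH=2, MEDIUM=1, other=0) followed by a 3-entry table lookup.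
import Mathlib
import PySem

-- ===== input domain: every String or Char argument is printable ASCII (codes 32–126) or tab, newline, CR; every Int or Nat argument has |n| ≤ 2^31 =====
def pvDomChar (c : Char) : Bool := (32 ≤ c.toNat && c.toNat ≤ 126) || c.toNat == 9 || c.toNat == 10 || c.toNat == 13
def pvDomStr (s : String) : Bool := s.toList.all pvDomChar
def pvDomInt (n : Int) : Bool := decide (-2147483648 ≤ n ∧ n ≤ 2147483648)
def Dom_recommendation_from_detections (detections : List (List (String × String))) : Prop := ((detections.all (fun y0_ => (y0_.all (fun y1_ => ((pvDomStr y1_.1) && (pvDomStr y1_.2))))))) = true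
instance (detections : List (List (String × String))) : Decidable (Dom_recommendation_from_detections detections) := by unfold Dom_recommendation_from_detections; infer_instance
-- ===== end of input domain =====

-- B replaces A's two ordered membership scans by one max-fold to a numeric rank plus a 3-entry table lookup (idiomatic decomposition, same O(n) cost).


-- ===== PORT A =====
-- d.get("severity","MEDIUM") : first-match lookup in the association list (PySem.Dict)
def sevOf (d : List (String × String)) : String :=
  PySem.Dict.getD (PySem.Dict.mk d) "severity" "MEDIUM"

def recommendation_from_detections (detections : List (List (String × String))) : List (String × String) :=
  if detections = [] then
    [("level", "Low"), ("action", "No immediate action required")]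
  else
    let severities := detections.map sevOf
    if "HIGH" ∈ severities then
      [("level", "High"), ("action", "Schedule immediate repair and dispatch crew")]
    else if "MEDIUM" ∈ severities then
      [("level", "Medium"), ("action", "Plan maintenance and monitor")]
    else
      [("level", "Low"), ("action", "Monitor periodically")]

-- ===== PORT B =====
-- rank_of.get(d.get("severity","MEDIUM"), 0)
def rankOf (d : List (String × String)) : Int :=
  PySem.Dict.getD (PySem.Dict.mk [("HIGH", (2 : Int)), ("MEDIUM", (1 : Int))]) (sevOf d) 0

def recommendation_from_detections_alt (detections : List (List (String × String))) : List (String × String) :=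
  match detections with
  | [] => [("level", "Low"), ("action", "No immediate action required")]
  | d :: ds =>
    -- max over a nonempty generator = fold of max starting at the first element
    let rank := ds.foldl (fun a d' => max a (rankOf d')) (rankOf d)
    let table := [[("level", "Low"), ("action", "Monitor periodically")],
                  [("level", "Medium"), ("action", "Plan maintenance and monitor")],
                  [("level", "High"), ("action", "Schedule immediate repair and dispatch crew")]]
    -- table[rank]; rank is always 0, 1 or 2, so the .getD [] totaliser is never taken
    (PySem.List.pyGet? table rank).getD []

-- ===== PRECONDITION & SPEC =====
def Spec_recommendation_from_detections (detections : List (List (String × String))) (out : List (String × String)) : Prop := out = recommendation_from_detections_alt detections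
instance (detections : List (List (String × String))) (out : List (String × String)) : Decidable (Spec_recommendation_from_detections detections out) := by unfold Spec_recommendation_from_detections; infer_instance

-- ===== CLAIM (what is proved, stated in full; the proofs are below) =====
def Claim_equal_recommendation_from_detections : Prop := ∀ (detections : List (List (String × String))), Dom_recommendation_from_detections detections → Spec_recommendation_from_detections detections (recommendation_from_detections detections)

-- ===== LEMMAS AND PROOFS =====
theorem rankOf_eq (d : List (String × String)) :
    rankOf d = if sevOf d = "HIGH" then 2 else if sevOf d = "MEDIUM" then 1 else 0 := by
  have hmk : PySem.Dict.mk [("HIGH", (2 : Int)), ("MEDIUM", (1 : Int))]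
      = (PySem.Dict.empty.insert "HIGH" 2).insert "MEDIUM" 1 := by decide
  unfold rankOf
  rw [hmk, PySem.Dict.getD_insert, PySem.Dict.getD_insert, PySem.Dict.getD_empty]
  split_ifs <;> simp_all

theorem fold_max_char (ds : List (List (String × String))) (acc : Int) (h0 : 0 ≤ acc) :
    ds.foldl (fun a d' => max a (rankOf d')) acc =
      if "HIGH" ∈ ds.map sevOf then max acc 2
      else if "MEDIUM" ∈ ds.map sevOf then max acc 1
      else acc := by
  induction ds generalizing acc with
  | nil => simp
  | cons d ds ih =>
    simp only [List.foldl_cons, List.map_cons, List.mem_cons]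
    rw [ih (max acc (rankOf d)) (le_trans h0 (le_max_left _ _))]
    rw [rankOf_eq d]
    by_cases h1 : sevOf d = "HIGH"
    · simp only [h1]
      simp
      all_goals split_ifs <;> omega
    · by_cases h2 : sevOf d = "MEDIUM"
      · simp only [h2]
        simp
        all_goals split_ifs <;> omega
      · simp [h1, h2, Ne.symm h1, Ne.symm h2]
        all_goals split_ifs <;> omega

theorem recommendation_from_detections_spec : Claim_equal_recommendation_from_detections := by
  intro detections _hdom
  unfold Spec_recommendation_from_detections
  match detections with
  | [] => rfl
  | d :: ds =>
    unfold recommendation_from_detections recommendation_from_detections_alt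
    simp only [reduceCtorEq, if_false]
    have hacc : 0 ≤ rankOf d := by rw [rankOf_eq]; split_ifs <;> omega
    have hfold : ds.foldl (fun a d' => max a (rankOf d')) (rankOf d)
        = (d :: ds).foldl (fun a d' => max a (rankOf d')) 0 := by
      rw [List.foldl_cons]
      simp [max_eq_right hacc]
    rw [hfold, fold_max_char (d :: ds) 0 le_rfl]
    split_ifs <;> decide
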